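-- pv_equiv track=rewrite | github.com/akspa0/parp | scripts/chunk_patcher/v1/adt_process_dir.py | calculate_grid_offset
-- ===== SOURCE A (Python) =====
-- from typing import Dict, List, Tuple
--
-- def calculate_grid_offset(source_coords: List[Tuple[int, int]],
--                          target_coords: List[Tuple[int, int]]) -> Tuple[int, int]:
--     """Calculate the offset between two coordinate grids"""
--     if not source_coords or not target_coords:
--         return (0, 0)
--
--     source_min_x = min(x for x, _ in source_coords)
--     source_min_y = min(y for _, y in source_coords)
--     target_min_x = min(x for x, _ in target_coords)
--     target_min_y = min(y for _, y in target_coords)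
--
--     return (target_min_x - source_min_x, target_min_y - source_min_y)
-- ===== SOURCE B (Python) =====
-- from typing import Dict, List, Tuple
--
-- def calculate_grid_offset(source_coords: List[Tuple[int, int]],
--                          target_coords: List[Tuple[int, int]]) -> Tuple[int, int]:
--     """Calculate the offset between two coordinate grids (sort-then-pick)."""
--     if not source_coords or not target_coords:
--         return (0, 0)
--     sx = sorted(x for x, _ in source_coords)[0]
--     sy = sorted(y for _, y in source_coords)[0]
--     tx = sorted(x for x, _ in target_coords)[0]
--     ty = sorted(y for _, y in target_coords)[0]
--     return (tx - sx, ty - sy)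
-- ===== Notes on version B (the rewrite author's own statement) =====
-- stated objective: alternative
-- what changed: Replaces the min() scans by sorting each coordinate projection and picking the first element of the sorted list (sort-then-pick instead of running-minimum scans).
import Mathlib
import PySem

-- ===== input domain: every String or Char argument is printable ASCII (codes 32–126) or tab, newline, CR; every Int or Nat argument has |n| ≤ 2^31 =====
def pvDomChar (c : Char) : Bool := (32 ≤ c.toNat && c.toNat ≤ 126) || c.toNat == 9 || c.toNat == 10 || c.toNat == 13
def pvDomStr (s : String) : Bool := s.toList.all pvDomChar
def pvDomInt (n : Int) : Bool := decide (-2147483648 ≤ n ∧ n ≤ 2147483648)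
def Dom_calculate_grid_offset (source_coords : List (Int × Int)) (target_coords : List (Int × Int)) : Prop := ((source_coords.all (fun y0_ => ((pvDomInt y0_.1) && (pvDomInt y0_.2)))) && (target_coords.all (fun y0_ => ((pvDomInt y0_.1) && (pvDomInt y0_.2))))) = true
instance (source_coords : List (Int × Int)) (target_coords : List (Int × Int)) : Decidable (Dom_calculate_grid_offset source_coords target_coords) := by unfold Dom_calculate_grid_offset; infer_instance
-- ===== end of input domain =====

-- B replaces A's min() scans by sorting each coordinate projection and taking the first
-- element of the sorted list (sort-then-pick; alternative algorithm, not faster).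

-- ===== PORT A =====
def calculate_grid_offset (source_coords : List (Int × Int)) (target_coords : List (Int × Int)) : Int × Int :=
  if source_coords = [] ∨ target_coords = [] then (0, 0)
  else
    let source_min_x := (PySem.List.min? (source_coords.map (fun p => p.1)) (fun v => v)).getD 0
    let source_min_y := (PySem.List.min? (source_coords.map (fun p => p.2)) (fun v => v)).getD 0
    let target_min_x := (PySem.List.min? (target_coords.map (fun p => p.1)) (fun v => v)).getD 0
    let target_min_y := (PySem.List.min? (target_coords.map (fun p => p.2)) (fun v => v)).getD 0
    (target_min_x - source_min_x, target_min_y - source_min_y)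

-- ===== PORT B =====
-- sorted(values)[0]; the index is only taken on a nonempty list, where headD's default is unreachable
def pvSortedFirst (l : List Int) : Int :=
  (PySem.List.sorted l (fun v => v) false).headD 0

def calculate_grid_offset_alt (source_coords : List (Int × Int)) (target_coords : List (Int × Int)) : Int × Int :=
  if source_coords = [] ∨ target_coords = [] then (0, 0)
  else
    let sx := pvSortedFirst (source_coords.map (fun p => p.1))
    let sy := pvSortedFirst (source_coords.map (fun p => p.2))
    let tx := pvSortedFirst (target_coords.map (fun p => p.1))
    let ty := pvSortedFirst (target_coords.map (fun p => p.2))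
    (tx - sx, ty - sy)

-- ===== PRECONDITION & SPEC =====
def Spec_calculate_grid_offset (source_coords : List (Int × Int)) (target_coords : List (Int × Int)) (out : Int × Int) : Prop := out = calculate_grid_offset_alt source_coords target_coords
instance (source_coords : List (Int × Int)) (target_coords : List (Int × Int)) (out : Int × Int) : Decidable (Spec_calculate_grid_offset source_coords target_coords out) := by unfold Spec_calculate_grid_offset; infer_instance

-- ===== CLAIM (what is proved, stated in full; the proofs are below) =====
def Claim_equal_calculate_grid_offset : Prop := ∀ (source_coords : List (Int × Int)) (target_coords : List (Int × Int)), Dom_calculate_grid_offset source_coords target_coords → Spec_calculate_grid_offset source_coords target_coords (calculate_grid_offset source_coords target_coords)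

-- ===== LEMMAS AND PROOFS =====
theorem pv_foldl_min_mem (t : List Int) : ∀ x : Int, t.foldl min x ∈ x :: t := by
  induction t with
  | nil => intro x; simp
  | cons y t ih =>
      intro x
      simp only [List.foldl_cons]
      have h := ih (min x y)
      rcases List.mem_cons.mp h with h1 | h1
      · rw [h1]
        rcases le_total x y with hxy | hxy
        · simp [min_eq_left hxy]
        · simp [min_eq_right hxy]
      · exact List.mem_cons.mpr (Or.inr (List.mem_cons.mpr (Or.inr h1)))

theorem pv_foldl_min_le (t : List Int) : ∀ x : Int, ∀ y ∈ x :: t, t.foldl min x ≤ y := by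
  induction t with
  | nil => intro x y hy; simp only [List.mem_cons, List.not_mem_nil, or_false] at hy; simp [hy]
  | cons z t ih =>
      intro x y hy
      simp only [List.foldl_cons]
      have hself : List.foldl min (min x z) t ≤ min x z :=
        ih (min x z) (min x z) List.mem_cons_self
      rcases List.mem_cons.mp hy with h1 | h1
      · rw [h1]; exact le_trans hself (min_le_left _ _)
      · rcases List.mem_cons.mp h1 with h2 | h2
        · rw [h2]; exact le_trans hself (min_le_right _ _)
        · exact ih (min x z) y (List.mem_cons.mpr (Or.inr h2))

theorem pvSortedFirst_eq_min (x : Int) (t : List Int) :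
    pvSortedFirst (x :: t) = t.foldl min x := by
  have hne : PySem.List.sorted (x :: t) (fun v => v) false ≠ [] := by
    intro h
    exact (List.cons_ne_nil x t) ((PySem.List.sorted_eq_nil_iff _ _ _).mp h)
  obtain ⟨m, s, hms⟩ := List.exists_cons_of_ne_nil hne
  have hperm : (PySem.List.sorted (x :: t) (fun v => v) false).Perm (x :: t) :=
    PySem.List.sorted_perm _ _ _
  have hmem : m ∈ x :: t := hperm.mem_iff.mp (by simp [hms])
  have hle : ∀ y ∈ x :: t, m ≤ y := PySem.List.key_head_sorted_le _ (fun v => v) hms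
  have h1 : m ≤ t.foldl min x := hle _ (pv_foldl_min_mem t x)
  have h2 : t.foldl min x ≤ m := pv_foldl_min_le t x m hmem
  simp [pvSortedFirst, hms]
  omega

theorem pvSortedFirst_map (l : List (Int × Int)) (f : Int × Int → Int) (hl : l ≠ []) :
    pvSortedFirst (l.map f) = (PySem.List.min? (l.map f) (fun v => v)).getD 0 := by
  obtain ⟨p, t, rfl⟩ := List.exists_cons_of_ne_nil hl
  simp [PySem.List.min?_id_cons, pvSortedFirst_eq_min]

-- ===== VERDICT (by name: the statement is the Claim_ definition above) =====
theorem calculate_grid_offset_spec : Claim_equal_calculate_grid_offset := by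
  intro s t _
  unfold Spec_calculate_grid_offset calculate_grid_offset calculate_grid_offset_alt
  by_cases h : s = [] ∨ t = []
  · simp [h]
  · push Not at h
    simp only [if_neg (by tauto : ¬(s = [] ∨ t = []))]
    rw [pvSortedFirst_map s _ h.1, pvSortedFirst_map s _ h.1,
        pvSortedFirst_map t _ h.2, pvSortedFirst_map t _ h.2]
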